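-- pv_equiv track=rewrite | github.com/sveee/advent-of-code | aoc/2023/13.py | get_horizontal_differences
-- ===== SOURCE A (Python) =====
-- def get_horizontal_differences(grid):
--     n_rows, n_columns = len(grid), len(grid[0])
--     differences_per_row = {}
--     for ri in range(1, n_rows):
--         n_differences = 0
--         for k in range(max(ri, n_rows - ri)):
--             if 0 <= ri - k - 1 < n_rows and 0 <= ri + k < n_rows:
--                 for ci in range(n_columns):
--                     n_differences += grid[ri - k - 1][ci] != grid[ri + k][ci]
--         differences_per_row[ri] = n_differences
--     return differences_per_row
-- ===== SOURCE B (Python) =====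
-- def get_horizontal_differences(grid):
--     n, w = len(grid), len(grid[0])
--     # Every mirrored pair (a, b) around the line ri satisfies a + b == 2*ri - 1, and
--     # conversely every pair a < b of opposite parity belongs to exactly one line.
--     # So: one pass over those pairs, bucketing mismatch counts by (a + b + 1) // 2.
--     buckets = {}
--     for b in range(1, n):
--         for a in range((b + 1) % 2, b, 2):
--             d = sum(grid[a][ci] != grid[b][ci] for ci in range(w))
--             ri = (a + b + 1) // 2
--             buckets[ri] = buckets.get(ri, 0) + d
--     return {ri: buckets.get(ri, 0) for ri in range(1, n)}
-- ===== Notes on version B (the rewrite author's own statement) =====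
-- stated objective: alternative
-- what changed: Instead of A's per-line reflection scan (for each split ri, walk offsets k with bounds guards and re-compare the mirrored rows), B makes one pass over all opposite-parity row pairs a<b, bucketing each pair's mismatch count into a dict keyed by its anti-diagonal line (a+b+1)//2, and then reads every line's answer off its bucket.
import Mathlib
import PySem

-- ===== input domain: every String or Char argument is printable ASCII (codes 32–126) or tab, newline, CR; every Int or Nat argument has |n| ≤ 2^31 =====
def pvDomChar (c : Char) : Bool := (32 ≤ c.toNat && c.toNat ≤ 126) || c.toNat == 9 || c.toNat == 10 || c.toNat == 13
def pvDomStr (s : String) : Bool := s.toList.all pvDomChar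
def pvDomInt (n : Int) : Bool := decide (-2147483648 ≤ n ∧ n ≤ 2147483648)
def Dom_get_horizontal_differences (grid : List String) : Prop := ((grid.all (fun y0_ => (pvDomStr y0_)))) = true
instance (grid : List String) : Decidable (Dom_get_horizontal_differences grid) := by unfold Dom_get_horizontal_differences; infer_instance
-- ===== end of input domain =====

-- B replaces A's per-line reflection scan by one pass over all opposite-parity row pairs,
-- bucketing each pair's mismatch count by its anti-diagonal line (alternative algorithm, same cost class).

-- ===== PORT A =====
-- Wherever A indexes (grid[...] and row[ci]), Pre_ guarantees the index is in range, so the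
-- pyGetD default "" and the Option comparison of pyGet? never decide the result.
def get_horizontal_differences (grid : List String) : List (Int × Int) :=
  let n_rows : Int := grid.length
  let n_columns : Int := PySem.Str.len (PySem.List.pyGetD grid 0 "")
  ((PySem.List.pyRange 1 n_rows).foldl (fun d ri =>
      d.insert ri
        ((PySem.List.pyRange 0 (max ri (n_rows - ri))).foldl (fun nd k =>
          if 0 ≤ ri - k - 1 ∧ ri - k - 1 < n_rows ∧ 0 ≤ ri + k ∧ ri + k < n_rows then
            (PySem.List.pyRange 0 n_columns).foldl (fun nd ci =>
              nd + (if PySem.Str.pyGet? (PySem.List.pyGetD grid (ri - k - 1) "") ci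
                      ≠ PySem.Str.pyGet? (PySem.List.pyGetD grid (ri + k) "") ci then 1 else 0)) nd
          else nd) 0)) (PySem.Dict.empty : PySem.Dict Int Int)).items

-- ===== PORT B =====
-- sum(grid[a][ci] != grid[b][ci] for ci in range(w))
def pvPairDiff (grid : List String) (w a b : Int) : Int :=
  (PySem.List.pyRange 0 w).foldl (fun acc ci =>
    acc + (if PySem.Str.pyGet? (PySem.List.pyGetD grid a "") ci
             ≠ PySem.Str.pyGet? (PySem.List.pyGetD grid b "") ci then 1 else 0)) 0

def get_horizontal_differences_alt (grid : List String) : List (Int × Int) :=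
  let n : Int := grid.length
  let w : Int := PySem.Str.len (PySem.List.pyGetD grid 0 "")
  let buckets : PySem.Dict Int Int :=
    (PySem.List.pyRange 1 n).foldl (fun bk b =>
      (PySem.List.pyRange (PySem.Int.mod (b + 1) 2) b 2).foldl (fun bk a =>
        let d := pvPairDiff grid w a b
        let ri := PySem.Int.floordiv (a + b + 1) 2
        bk.insert ri (bk.getD ri 0 + d)) bk) PySem.Dict.empty
  (PySem.List.pyRange 1 n).map (fun ri => (ri, buckets.getD ri 0))

-- ===== PRECONDITION & SPEC =====
-- Pre_ is exactly where A returns: a nonempty grid whose rows are all at least as long as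
-- the first row (a shorter row makes A's grid[...][ci] raise IndexError when len(grid) ≥ 2).
def Pre_get_horizontal_differences (grid : List String) : Prop :=
  grid ≠ [] ∧ ∀ row ∈ grid, PySem.Str.len (grid.headD "") ≤ PySem.Str.len row
instance (grid : List String) : Decidable (Pre_get_horizontal_differences grid) := by
  unfold Pre_get_horizontal_differences; infer_instance

def pvWitness_get_horizontal_differences : List String := ["#.", ".#", "#."]

def Spec_get_horizontal_differences (grid : List String) (out : List (Int × Int)) : Prop := out = get_horizontal_differences_alt grid
instance (grid : List String) (out : List (Int × Int)) : Decidable (Spec_get_horizontal_differences grid out) := by unfold Spec_get_horizontal_differences; infer_instance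

-- ===== CLAIM (what is proved, stated in full; the proofs are below) =====
def Claim_equal_get_horizontal_differences : Prop := ∀ (grid : List String), Dom_get_horizontal_differences grid → Pre_get_horizontal_differences grid → Spec_get_horizontal_differences grid (get_horizontal_differences grid)

-- ===== LEMMAS AND PROOFS =====

-- canonical middle form both ports are reduced to
def pvCanon (grid : List String) : List (Int × Int) :=
  (PySem.List.pyRange 1 (grid.length : Int)).map (fun ri =>
    (ri, ((List.range (min ri.toNat (grid.length - ri.toNat))).map (fun k =>
      ((List.range (grid.headD "").toList.length).map (fun ci =>
        if (grid.getD (ri.toNat - 1 - k) "").toList[ci]? ≠ (grid.getD (ri.toNat + k) "").toList[ci]?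
        then (1 : Int) else 0)).sum)).sum))

theorem pv_head_getD (grid : List String) (h : grid ≠ []) :
    PySem.List.pyGetD grid 0 "" = grid.headD "" := by
  cases grid with
  | nil => exact absurd rfl h
  | cons a t => simp [PySem.List.pyGetD_zero_cons]

theorem pv_items_loop (l : List Int) (f : Int → Int) (hl : l.Nodup) :
    ((l.foldl (fun d ri => d.insert ri (f ri)) (PySem.Dict.empty : PySem.Dict Int Int)).items)
    = l.map (fun ri => (ri, f ri)) := by
  rw [PySem.Dict.items_foldl_insert_fresh l (fun ri => ri) f _
    (fun a _ => by simp [PySem.Dict.contains_empty]) (by simpa using hl)]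
  rfl

theorem A_eq_canon (grid : List String) (h : Pre_get_horizontal_differences grid) :
    get_horizontal_differences grid = pvCanon grid := by
  obtain ⟨hne, hrows⟩ := h
  unfold get_horizontal_differences pvCanon
  rw [pv_head_getD grid hne]
  simp only [PySem.Str.len_eq]
  rw [pv_items_loop _ _ (PySem.List.nodup_pyRange_one 1 (grid.length : Int))]
  apply List.map_congr_left
  intro ri hri
  rw [PySem.List.mem_pyRange_one] at hri
  have hi1 : 1 ≤ ri.toNat := by omega
  have hin : ri.toNat < grid.length := by omega
  have hricast : (ri.toNat : Int) = ri := Int.toNat_of_nonneg (by omega)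
  set i := ri.toNat with hidef
  set n : Nat := grid.length with hndef
  set w : Nat := (grid.headD "").toList.length with hwdef
  refine congrArg _ ?_
  have hm : min ri ((n : Int) - ri) = ((min i (n - i) : Nat) : Int) := by
    omega
  -- step 1: rewrite the guarded body
  rw [PySem.List.foldl_congr_mem _ _
    (fun nd k => if k < ((min i (n - i) : Nat) : Int) then
        nd + ((PySem.List.pyRange 0 (w : Int)).map (fun ci =>
          (if PySem.Str.pyGet? (PySem.List.pyGetD grid (ri - k - 1) "") ci
             ≠ PySem.Str.pyGet? (PySem.List.pyGetD grid (ri + k) "") ci then (1:Int) else 0))).sum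
      else nd) 0
    (by
      intro acc k hkmem
      rw [PySem.List.mem_pyRange_one] at hkmem
      apply if_congr
      · constructor <;> intro <;> omega
      · exact PySem.List.foldl_add _ _ acc
      · rfl)]
  rw [PySem.List.foldl_ite_eq_foldl_filter (fun k => k < ((min i (n - i) : Nat) : Int))]
  -- step 2: the filtered range is pyRange 0 m
  have hfil : (PySem.List.pyRange 0 (max ri ((n:Int) - ri))).filter
      (fun k => decide (k < ((min i (n - i) : Nat) : Int)))
      = PySem.List.pyRange 0 ((min i (n - i) : Nat) : Int) := by
    rw [PySem.List.pyRange_one_append 0 ((min i (n - i) : Nat) : Int) (max ri ((n:Int) - ri))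
      (by omega) (by omega), List.filter_append]
    rw [List.filter_eq_self.mpr, List.filter_eq_nil_iff.mpr, List.append_nil]
    · intro a ha
      rw [PySem.List.mem_pyRange_one] at ha
      simp; omega
    · intro a ha
      rw [PySem.List.mem_pyRange_one] at ha
      simp; omega
  rw [hfil, PySem.List.foldl_add, zero_add, PySem.List.pyRange_zero_nat (min i (n - i)),
    List.map_map]
  apply congrArg
  apply List.map_congr_left
  intro k hk
  have hk' : k < min i (n - i) := List.mem_range.mp hk
  simp only [Function.comp]
  rw [PySem.List.pyRange_zero_nat w, List.map_map]
  apply congrArg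
  apply List.map_congr_left
  intro ci hci
  have hidx1 : ri - (k : Int) - 1 = ((i - 1 - k : Nat) : Int) := by omega
  have hidx2 : ri + (k : Int) = ((i + k : Nat) : Int) := by omega
  simp only [Function.comp, hidx1, hidx2, PySem.List.pyGetD_natCast, PySem.Str.pyGet?_natCast]

-- B-side lemmas -------------------------------------------------------------

-- getD after an accumulate-into-bucket loop = the filtered sum of contributions
theorem pv_getD_bucket_loop {α : Type} (l : List α) (key : α → Int) (f : α → Int)
    (d : PySem.Dict Int Int) (v : Int) :
    (l.foldl (fun bk p => bk.insert (key p) (bk.getD (key p) 0 + f p)) d).getD v 0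
    = d.getD v 0 + ((l.filter (fun p => key p == v)).map f).sum := by
  induction l generalizing d with
  | nil => simp
  | cons p t ih =>
    simp only [List.foldl_cons, List.filter_cons, ih]
    rw [PySem.Dict.getD_insert]
    by_cases hv : v = key p
    · simp [hv]; ring
    · have hf : (key p == v) = false := by simp; omega
      simp [hv, hf]

-- a flatMap of conditional singletons is a filtered map
theorem pv_flatMap_if_singleton {α β : Type} (l : List α) (c : α → Prop) [DecidablePred c]
    (g : α → β) :
    l.flatMap (fun b => if c b then [g b] else []) = (l.filter (fun b => decide (c b))).map g := by
  induction l with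
  | nil => rfl
  | cons x t ih =>
    simp only [List.flatMap_cons, List.filter_cons]
    by_cases hx : c x <;> simp [hx, ih]

-- filter commutes with flatMap
theorem pv_filter_flatMap {α β : Type} (l : List α) (g : α → List β) (p : β → Bool) :
    (l.flatMap g).filter p = l.flatMap (fun b => (g b).filter p) := by
  induction l with
  | nil => rfl
  | cons x t ih => simp [List.flatMap_cons, List.filter_append, ih]

-- filter of List.range by an Int equality: at most one survivor
theorem pv_range_filter_int (m : Nat) (t : Int) :
    (List.range m).filter (fun k : Nat => decide ((k : Int) = t))
    = if 0 ≤ t ∧ t < (m : Int) then [t.toNat] else [] := by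
  by_cases h : 0 ≤ t ∧ t < (m : Int)
  · rw [if_pos h]
    rw [List.filter_congr (l := List.range m) (q := fun k : Nat => k == t.toNat)
      (by intro k hk; rw [Bool.eq_iff_iff]; simp only [decide_eq_true_eq, beq_iff_eq]; omega)]
    rw [List.filter_beq, List.count_eq_one_of_mem (List.nodup_range) (by simp only [List.mem_range]; omega),
      List.replicate_one]
  · rw [if_neg h]
    rw [List.filter_eq_nil_iff.mpr]
    intro k hk
    simp only [List.mem_range] at hk
    simp only [decide_eq_true_eq]
    omega

-- the inner loop over a (step 2) keeps at most one pair per target line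
theorem pv_inner_filter (b ri : Int) (hb : 1 ≤ b) :
    (((PySem.List.pyRange (PySem.Int.mod (b + 1) 2) b 2).map (fun a => ((a, b) : Int × Int))).filter
        (fun p => PySem.Int.floordiv (p.1 + p.2 + 1) 2 == ri))
    = if ri ≤ b ∧ b ≤ 2 * ri - 1 then [(2 * ri - 1 - b, b)] else [] := by
  rw [PySem.Int.mod_eq_emod_of_pos (by norm_num)]
  set s : Int := (b + 1) % 2 with hs
  have hslt : s < b := by omega
  rw [PySem.List.pyRange_of_pos _ _ (by norm_num : (0:Int) < 2), if_pos hslt]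
  rw [List.map_map, List.filter_map]
  set q : Int := (s + b + 1) / 2 with hq
  have hq2 : 2 * q = s + b + 1 := by omega
  rw [List.filter_congr (q := fun k : Nat => decide ((k : Int) = ri - q))
    (by
      intro k hk
      rw [Bool.eq_iff_iff]
      simp only [Function.comp, PySem.Int.floordiv_eq_ediv_of_pos (by norm_num : (0:Int) < 2),
        beq_iff_eq, decide_eq_true_eq]
      omega)]
  rw [pv_range_filter_int]
  set m : Int := (b - s + 2 - 1) / 2 with hm
  have hm2 : 2 * m = b - s + 1 := by omega
  by_cases hc : ri ≤ b ∧ b ≤ 2 * ri - 1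
  · rw [if_pos hc, if_pos (by omega), List.map_cons, List.map_nil]
    have harith : s + 2 * ((ri - q).toNat : Int) = 2 * ri - 1 - b := by omega
    simp only [Function.comp]
    rw [harith]
  · rw [if_neg hc, if_neg (by omega), List.map_nil]

-- a flatMap congruence over members
theorem pv_flatMap_congr {α β : Type} (l : List α) (f g : α → List β)
    (h : ∀ x ∈ l, f x = g x) : l.flatMap f = l.flatMap g := by
  rw [List.flatMap_def, List.flatMap_def, List.map_congr_left h]

-- the bucket-loop lemma specialised to B's concrete step (first-order form for rw)
theorem pv_getD_bucket_loop' (grid : List String) (w : Int) (L : List (Int × Int))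
    (d : PySem.Dict Int Int) (v : Int) :
    (L.foldl (fun bk p => bk.insert (PySem.Int.floordiv (p.1 + p.2 + 1) 2)
        (bk.getD (PySem.Int.floordiv (p.1 + p.2 + 1) 2) 0 + pvPairDiff grid w p.1 p.2)) d).getD v 0
    = d.getD v 0 + ((L.filter (fun p => PySem.Int.floordiv (p.1 + p.2 + 1) 2 == v)).map
        (fun p => pvPairDiff grid w p.1 p.2)).sum :=
  pv_getD_bucket_loop L (fun p => PySem.Int.floordiv (p.1 + p.2 + 1) 2)
    (fun p => pvPairDiff grid w p.1 p.2) d v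

theorem B_eq_canon (grid : List String) (h : Pre_get_horizontal_differences grid) :
    get_horizontal_differences_alt grid = pvCanon grid := by
  obtain ⟨hne, _⟩ := h
  unfold get_horizontal_differences_alt pvCanon
  rw [pv_head_getD grid hne]
  simp only [PySem.Str.len_eq]
  apply List.map_congr_left
  intro ri hri
  rw [PySem.List.mem_pyRange_one] at hri
  have hi1 : 1 ≤ ri.toNat := by omega
  have hin : ri.toNat < grid.length := by omega
  set i := ri.toNat with hidef
  set n : Nat := grid.length with hndef
  set w : Nat := (grid.headD "").toList.length with hwdef
  refine congrArg _ ?_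
  -- (1) turn the nested bucket loop into one fold over the pair list
  rw [PySem.List.foldl_congr_mem _ _
      (fun bk b => (((PySem.List.pyRange (PySem.Int.mod (b + 1) 2) b 2).map
          (fun a => ((a, b) : Int × Int))).foldl
        (fun bk p => bk.insert (PySem.Int.floordiv (p.1 + p.2 + 1) 2)
          (bk.getD (PySem.Int.floordiv (p.1 + p.2 + 1) 2) 0 + pvPairDiff grid (w : Int) p.1 p.2)) bk))
      PySem.Dict.empty
      (by intro acc b _; simp only [List.foldl_map])]
  rw [← List.foldl_flatMap]
  rw [pv_getD_bucket_loop' grid (w : Int)]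
  rw [PySem.Dict.getD_empty, zero_add]
  -- (2) compute the filtered pair list
  rw [pv_filter_flatMap]
  rw [pv_flatMap_congr _ _
      (fun b => if ri ≤ b ∧ b ≤ 2 * ri - 1 then [((2 * ri - 1 - b, b) : Int × Int)] else [])
      (by
        intro b hb
        rw [PySem.List.mem_pyRange_one] at hb
        exact pv_inner_filter b ri (by omega))]
  rw [pv_flatMap_if_singleton _ (fun b => ri ≤ b ∧ b ≤ 2 * ri - 1)
      (fun b => ((2 * ri - 1 - b, b) : Int × Int))]
  -- (3) the surviving outer indices are exactly pyRange ri (min n (2*ri))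
  have hfil : (PySem.List.pyRange 1 (n : Int)).filter
      (fun b => decide (ri ≤ b ∧ b ≤ 2 * ri - 1))
      = PySem.List.pyRange ri (min (n : Int) (2 * ri)) := by
    rw [PySem.List.pyRange_one_append 1 ri (n : Int) (by omega) (by omega),
      PySem.List.pyRange_one_append ri (min (n : Int) (2 * ri)) (n : Int) (by omega) (by omega),
      List.filter_append, List.filter_append]
    rw [List.filter_eq_nil_iff.mpr (by
        intro b hb; rw [PySem.List.mem_pyRange_one] at hb
        simp only [decide_eq_true_eq]; omega),
      List.filter_eq_self.mpr (by
        intro b hb; rw [PySem.List.mem_pyRange_one] at hb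
        simp only [decide_eq_true_eq]; omega),
      List.filter_eq_nil_iff.mpr (by
        intro b hb; rw [PySem.List.mem_pyRange_one] at hb
        simp only [decide_eq_true_eq]; omega)]
    simp only [List.nil_append, List.append_nil]
  rw [hfil, List.map_map, PySem.List.pyRange_one ri (min (n : Int) (2 * ri)), List.map_map]
  rw [show ((min (n : Int) (2 * ri)) - ri).toNat = min i (n - i) from by omega]
  -- (4) pointwise agreement with the canonical reflection sum
  apply congrArg
  apply List.map_congr_left
  intro k hk
  have hk' : k < min i (n - i) := List.mem_range.mp hk
  simp only [Function.comp]
  unfold pvPairDiff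
  rw [PySem.List.foldl_add, zero_add, PySem.List.pyRange_zero_nat w, List.map_map]
  apply congrArg
  apply List.map_congr_left
  intro ci hci
  have hidx2 : ri + (k : Int) = ((i + k : Nat) : Int) := by omega
  have hidx1 : 2 * ri - 1 - ((i + k : Nat) : Int) = ((i - 1 - k : Nat) : Int) := by omega
  simp only [Function.comp, hidx2, hidx1, PySem.List.pyGetD_natCast, PySem.Str.pyGet?_natCast]

-- ===== VERDICT (by name: the statement is the Claim_ definition above) =====
theorem get_horizontal_differences_spec : Claim_equal_get_horizontal_differences := by
  intro grid _ hpre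
  unfold Spec_get_horizontal_differences
  rw [A_eq_canon grid hpre, B_eq_canon grid hpre]
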